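-- pv_equiv track=rewrite | github.com/wetmore/aoc2020 | day8_2.py | terminates
-- ===== SOURCE A (Python) =====
-- def terminates(program):
--     acc = 0
--     i = 0
--     executed_lines = set()
--
--     while True:
--         if i == len(program):
--             return acc
--         if i in executed_lines:
--             return None
--         executed_lines.add(i)
--         instruction, value = program[i]
--         if instruction == 'acc':
--             acc += value
--             i += 1
--         if instruction == 'jmp':
--             i += value
--         if instruction == 'nop':
--             i += 1
-- ===== SOURCE B (Python) =====
-- def terminates(program):
--     n = len(program)
--
--     def step(i, acc):
--         op, v = program[i]
--         if op == 'acc':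
--             return i + 1, acc + v
--         if op == 'jmp':
--             return i + v, acc
--         return (i + 1, acc) if op == 'nop' else (i, acc)
--
--     i, acc = 0, 0
--     for _ in range(2 * n + 1):
--         if i == n:
--             return acc
--         i, acc = step(i, acc)
--     return None
-- ===== Notes on version B (the rewrite author's own statement) =====
-- stated objective: alternative
-- what changed: Replaces the visited-line set and its membership test with a pure one-instruction step function (if/elif dispatch returning the next (i, acc) pair) driven by a counted loop of at most 2*len(program)+1 iterations that returns None when the budget is exhausted: by pigeonhole over the at most 2*len valid indices, exhausting the budget means a line repeated.
import Mathlib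
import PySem

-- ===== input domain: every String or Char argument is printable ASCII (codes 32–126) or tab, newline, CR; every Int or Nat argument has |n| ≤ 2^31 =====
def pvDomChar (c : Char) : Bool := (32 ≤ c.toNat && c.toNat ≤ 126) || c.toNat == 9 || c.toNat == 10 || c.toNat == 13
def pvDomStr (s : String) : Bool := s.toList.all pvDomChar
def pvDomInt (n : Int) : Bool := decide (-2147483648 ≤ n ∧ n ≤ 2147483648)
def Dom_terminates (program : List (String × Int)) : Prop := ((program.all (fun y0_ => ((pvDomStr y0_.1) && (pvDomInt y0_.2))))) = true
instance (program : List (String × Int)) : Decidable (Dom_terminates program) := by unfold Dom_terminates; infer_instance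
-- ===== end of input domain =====

-- B replaces A's visited-line set by a pure one-instruction step function driven by a counted
-- loop of at most 2*len(program)+1 steps (pigeonhole: exhausting the budget means a line
-- repeated) — alternative decomposition, same cost.


-- ===== PORT A =====
-- A's 'while True' loop always ends within 2*len(program)+1 iterations (each iteration either
-- returns, hits an invalid index, or adds a fresh valid index — of which there are at most
-- 2*len — to the set), so it is ported with fuel 2*len(program)+2; the IndexError path
-- (pyGet? = none) yields none and is excluded by Pre_terminates.
def terminatesLoopA (program : List (String × Int)) : Nat → Int → Int → PySem.Set Int → Option Int
  | 0, _, _, _ => none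
  | Nat.succ fuel, acc, i, executed =>
    if i = (program.length : Int) then some acc
    else if PySem.Set.contains executed i then none
    else
      match PySem.List.pyGet? program i with
      | none => none  -- IndexError
      | some (instruction, value) =>
        let acc' := if instruction = "acc" then acc + value else acc
        let i1 := if instruction = "acc" then i + 1 else i
        let i2 := if instruction = "jmp" then i1 + value else i1
        let i3 := if instruction = "nop" then i2 + 1 else i2
        terminatesLoopA program fuel acc' i3 (PySem.Set.add executed i)

def terminates (program : List (String × Int)) : Option Int :=
  terminatesLoopA program (2 * program.length + 2) 0 0 PySem.Set.empty

-- ===== PORT B =====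
-- Source B's helper 'step': one instruction, as a pure (i, acc) ↦ (i', acc') map; the IndexError
-- of 'program[i]' is the none branch, excluded by Pre_terminates.
def stepB (program : List (String × Int)) (i acc : Int) : Option (Int × Int) :=
  match PySem.List.pyGet? program i with
  | none => none  -- IndexError
  | some (op, v) =>
    if op = "acc" then some (i + 1, acc + v)
    else if op = "jmp" then some (i + v, acc)
    else if op = "nop" then some (i + 1, acc)
    else some (i, acc)

-- Source B's 'for _ in range(2 * n + 1)' loop: the fuel is exactly the iteration counter.
def runB (program : List (String × Int)) : Nat → Int → Int → Option Int
  | 0, _, _ => none  -- loop exhausted: return None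
  | Nat.succ fuel, i, acc =>
    if i = (program.length : Int) then some acc
    else
      match stepB program i acc with
      | none => none
      | some (i', acc') => runB program fuel i' acc'

def terminates_alt (program : List (String × Int)) : Option Int :=
  runB program (2 * program.length + 1) 0 0

-- ===== PRECONDITION & SPEC =====
-- the index-successor of one instruction; freezes outside the valid range (default ("", 0))
def pvStepI (program : List (String × Int)) (i : Int) : Int :=
  if (PySem.List.pyGetD program i ("", 0)).1 = "acc" then i + 1
  else if (PySem.List.pyGetD program i ("", 0)).1 = "jmp" then i + (PySem.List.pyGetD program i ("", 0)).2
  else if (PySem.List.pyGetD program i ("", 0)).1 = "nop" then i + 1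
  else i

-- the index trace of the run: pvTr k is the instruction pointer after k executed instructions
def pvTr (program : List (String × Int)) : Nat → Int
  | 0 => 0
  | k + 1 => pvStepI program (pvTr program k)

-- Pre_ excludes EXACTLY the programs on which A raises IndexError: those whose run reaches an
-- index outside [-n, n] (Python indexes from -n to n-1; i = n returns). The run either does so
-- within its first 2n+1 steps or never (after a repeated or terminal index the trace stays in
-- range forever), so the bound loses nothing; B raises IndexError on the same inputs.
def Pre_terminates (program : List (String × Int)) : Prop :=
  ∀ k ∈ List.range (2 * program.length + 2),
    -(program.length : Int) ≤ pvTr program k ∧ pvTr program k ≤ (program.length : Int)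
instance (program : List (String × Int)) : Decidable (Pre_terminates program) := by unfold Pre_terminates; infer_instance

def pvWitness_terminates : (List (String × Int)) := [("nop", 0), ("acc", 3), ("jmp", -2)]

def Spec_terminates (program : List (String × Int)) (out : Option Int) : Prop := out = terminates_alt program
instance (program : List (String × Int)) (out : Option Int) : Decidable (Spec_terminates program out) := by unfold Spec_terminates; infer_instance

-- ===== CLAIM (what is proved, stated in full; the proofs are below) =====
def Claim_equal_terminates : Prop := ∀ (program : List (String × Int)), Dom_terminates program → Pre_terminates program → Spec_terminates program (terminates program)

-- ===== LEMMAS AND PROOFS =====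

-- the accumulator-step of one instruction; freezes outside the valid range
def pvStepAcc (program : List (String × Int)) (i acc : Int) : Int :=
  let p := PySem.List.pyGetD program i ("", 0)
  if p.1 = "acc" then acc + p.2 else acc

-- the accumulator trace of the run
def pvAc (program : List (String × Int)) : Nat → Int
  | 0 => 0
  | k + 1 => pvStepAcc program (pvTr program k) (pvAc program k)

theorem pvGetD_of_some {program : List (String × Int)} {i : Int} {p : String × Int}
    (h : PySem.List.pyGet? program i = some p) :
    PySem.List.pyGetD program i ("", 0) = p := by
  simp [PySem.List.pyGetD, h]

theorem pvFetch_some {program : List (String × Int)} {i : Int}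
    (h1 : -(program.length : Int) ≤ i) (h2 : i < (program.length : Int)) :
    ∃ p, PySem.List.pyGet? program i = some p := by
  rcases ho : PySem.List.pyGet? program i with _ | p
  · rw [PySem.List.pyGet?_eq_none_iff] at ho
    exact absurd (by constructor <;> omega : PySem.Raise.InRange program.length i) ho
  · exact ⟨p, rfl⟩

-- under Pre_, the trace stays in [-n, n] for the first 2n+1 steps
theorem pvTr_bounds {program : List (String × Int)} (hpre : Pre_terminates program)
    {k : Nat} (hk : k ≤ 2 * program.length + 1) :
    -(program.length : Int) ≤ pvTr program k ∧ pvTr program k ≤ (program.length : Int) :=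
  hpre k (by rw [List.mem_range]; omega)

-- determinism: equal indices generate equal index tails
theorem pvTr_period {program : List (String × Int)} {s t : Nat}
    (h : pvTr program s = pvTr program t) :
    ∀ d, pvTr program (s + d) = pvTr program (t + d) := by
  intro d
  induction d with
  | zero => exact h
  | succ d ih =>
    show pvStepI program (pvTr program (s + d)) = pvStepI program (pvTr program (t + d))
    rw [ih]

-- A's fallthrough if-chain computes the next trace values
theorem pvBody_step {program : List (String × Int)} {i acc : Int} {instruction : String} {value : Int}
    (h : PySem.List.pyGet? program i = some (instruction, value)) :
    ((if instruction = "acc" then acc + value else acc) = pvStepAcc program i acc) ∧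
    ((let i1 := if instruction = "acc" then i + 1 else i
      let i2 := if instruction = "jmp" then i1 + value else i1
      if instruction = "nop" then i2 + 1 else i2) = pvStepI program i) := by
  have hd := pvGetD_of_some h
  constructor
  · simp [pvStepAcc, hd]
  · simp only [pvStepI, hd]
    by_cases ha : instruction = "acc"
    · simp [ha]
    · by_cases hj : instruction = "jmp"
      · simp [hj]
      · by_cases hn : instruction = "nop"
        · simp [hn]
        · simp [ha, hj, hn]

-- B's step helper computes the next trace values
theorem pvStepB_eq {program : List (String × Int)} {i acc : Int} {instruction : String} {value : Int}
    (h : PySem.List.pyGet? program i = some (instruction, value)) :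
    stepB program i acc = some (pvStepI program i, pvStepAcc program i acc) := by
  have hd := pvGetD_of_some h
  simp only [stepB, h, pvStepI, pvStepAcc, hd]
  by_cases ha : instruction = "acc"
  · simp [ha]
  · by_cases hj : instruction = "jmp"
    · simp [hj]
    · by_cases hn : instruction = "nop"
      · simp [hn]
      · simp [ha, hj, hn]

-- B returns the accumulator of the first hit of n
theorem pvB_some {program : List (String × Int)} (hpre : Pre_terminates program) {T : Nat}
    (hTle : T ≤ 2 * program.length)
    (hT : pvTr program T = (program.length : Int))
    (hmin : ∀ j, j < T → pvTr program j ≠ (program.length : Int)) :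
    ∀ fuel k, k ≤ T → T < k + fuel →
      runB program fuel (pvTr program k) (pvAc program k) = some (pvAc program T) := by
  intro fuel
  induction fuel with
  | zero => intro k h1 h2; omega
  | succ fuel ih =>
    intro k h1 h2
    by_cases hk : k = T
    · subst hk
      simp [runB, hT]
    · have hkT : k < T := by omega
      have hne := hmin k hkT
      have hb := pvTr_bounds hpre (k := k) (by omega)
      obtain ⟨⟨instruction, value⟩, hsome⟩ := pvFetch_some hb.1 (by omega)
      simp only [runB, if_neg hne, pvStepB_eq (acc := pvAc program k) hsome]
      exact ih (k + 1) (by omega) (by omega)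

-- B returns none if n is not hit within the budget
theorem pvB_none {program : List (String × Int)} (hpre : Pre_terminates program) :
    ∀ fuel k, k + fuel ≤ 2 * program.length + 1 →
      (∀ m, m < fuel → pvTr program (k + m) ≠ (program.length : Int)) →
      runB program fuel (pvTr program k) (pvAc program k) = none := by
  intro fuel
  induction fuel with
  | zero => intro k _ _; rfl
  | succ fuel ih =>
    intro k hkf hm
    have hne := hm 0 (by omega)
    rw [Nat.add_zero] at hne
    have hb := pvTr_bounds hpre (k := k) (by omega)
    obtain ⟨⟨instruction, value⟩, hsome⟩ := pvFetch_some hb.1 (by omega)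
    simp only [runB, if_neg hne, pvStepB_eq (acc := pvAc program k) hsome]
    exact ih (k + 1) (by omega) (fun m h => by
      have hh := hm (m + 1) (by omega)
      rwa [show k + (m + 1) = k + 1 + m from by omega] at hh)

-- A returns the accumulator of the first hit of n (the prefix being repetition-free)
theorem pvA_some {program : List (String × Int)} (hpre : Pre_terminates program) {T : Nat}
    (hTle : T ≤ 2 * program.length)
    (hT : pvTr program T = (program.length : Int))
    (hmin : ∀ j, j < T → pvTr program j ≠ (program.length : Int))
    (hdist : ∀ s t, s < t → t < T → pvTr program s ≠ pvTr program t) :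
    ∀ fuel k (ex : PySem.Set Int), k ≤ T → T < k + fuel →
      (∀ x, x ∈ ex ↔ ∃ j, j < k ∧ pvTr program j = x) →
      terminatesLoopA program fuel (pvAc program k) (pvTr program k) ex = some (pvAc program T) := by
  intro fuel
  induction fuel with
  | zero => intro k ex h1 h2 _; omega
  | succ fuel ih =>
    intro k ex h1 h2 hex
    by_cases hk : k = T
    · subst hk
      simp [terminatesLoopA, hT]
    · have hkT : k < T := by omega
      have hne := hmin k hkT
      have hnotmem : ¬ pvTr program k ∈ ex := by
        rw [hex]
        rintro ⟨j, hj, hjeq⟩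
        exact hdist j k hj hkT hjeq
      have hcont : PySem.Set.contains ex (pvTr program k) = false := by
        rcases hc : PySem.Set.contains ex (pvTr program k) with _ | _
        · rfl
        · exact absurd ((PySem.Set.contains_iff ex _).mp hc) hnotmem
      have hb := pvTr_bounds hpre (k := k) (by omega)
      obtain ⟨⟨instruction, value⟩, hsome⟩ := pvFetch_some hb.1 (by omega)
      have hstep := pvBody_step (acc := pvAc program k) hsome
      simp only [terminatesLoopA, if_neg hne, hcont, Bool.false_eq_true, if_false, hsome]
      rw [hstep.1, hstep.2]
      refine ih (k + 1) _ (by omega) (by omega) ?_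
      intro x
      rw [PySem.Set.mem_add, hex]
      constructor
      · rintro (⟨j, hj, hjeq⟩ | hx)
        · exact ⟨j, by omega, hjeq⟩
        · exact ⟨k, by omega, hx.symm⟩
      · rintro ⟨j, hj, hjeq⟩
        by_cases hjk : j = k
        · exact Or.inr (by rw [← hjeq, hjk])
        · exact Or.inl ⟨j, by omega, hjeq⟩

-- A returns none at the first repeated line (the trace not having hit n before)
theorem pvA_none {program : List (String × Int)} (hpre : Pre_terminates program) {t0 : Nat}
    (ht0le : t0 ≤ 2 * program.length)
    (hrep : ∃ s, s < t0 ∧ pvTr program s = pvTr program t0)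
    (hnoN : ∀ m, m ≤ t0 → pvTr program m ≠ (program.length : Int))
    (hdist : ∀ s t, s < t → t < t0 → pvTr program s ≠ pvTr program t) :
    ∀ fuel k (ex : PySem.Set Int), k ≤ t0 → t0 < k + fuel →
      (∀ x, x ∈ ex ↔ ∃ j, j < k ∧ pvTr program j = x) →
      terminatesLoopA program fuel (pvAc program k) (pvTr program k) ex = none := by
  intro fuel
  induction fuel with
  | zero => intro k ex h1 h2 _; omega
  | succ fuel ih =>
    intro k ex h1 h2 hex
    have hne := hnoN k h1
    by_cases hk : k = t0
    · subst hk
      obtain ⟨s, hs, hseq⟩ := hrep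
      have hmem : pvTr program k ∈ ex := by
        rw [hex]; exact ⟨s, hs, hseq⟩
      have hcont : PySem.Set.contains ex (pvTr program k) = true :=
        (PySem.Set.contains_iff ex _).mpr hmem
      simp only [terminatesLoopA]
      rw [if_neg hne, if_pos hcont]
    · have hkT : k < t0 := by omega
      have hnotmem : ¬ pvTr program k ∈ ex := by
        rw [hex]
        rintro ⟨j, hj, hjeq⟩
        exact hdist j k hj hkT hjeq
      have hcont : PySem.Set.contains ex (pvTr program k) = false := by
        rcases hc : PySem.Set.contains ex (pvTr program k) with _ | _
        · rfl
        · exact absurd ((PySem.Set.contains_iff ex _).mp hc) hnotmem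
      have hb := pvTr_bounds hpre (k := k) (by omega)
      obtain ⟨⟨instruction, value⟩, hsome⟩ := pvFetch_some hb.1 (by omega)
      have hstep := pvBody_step (acc := pvAc program k) hsome
      simp only [terminatesLoopA, if_neg hne, hcont, Bool.false_eq_true, if_false, hsome]
      rw [hstep.1, hstep.2]
      refine ih (k + 1) _ (by omega) (by omega) ?_
      intro x
      rw [PySem.Set.mem_add, hex]
      constructor
      · rintro (⟨j, hj, hjeq⟩ | hx)
        · exact ⟨j, by omega, hjeq⟩
        · exact ⟨k, by omega, hx.symm⟩
      · rintro ⟨j, hj, hjeq⟩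
        by_cases hjk : j = k
        · exact Or.inr (by rw [← hjeq, hjk])
        · exact Or.inl ⟨j, by omega, hjeq⟩

-- pigeonhole: if the trace never hits n in the first 2n+1 positions, a value repeats there
theorem pvRepeat {program : List (String × Int)} (hpre : Pre_terminates program)
    (hno : ∀ m, m ≤ 2 * program.length → pvTr program m ≠ (program.length : Int)) :
    ∃ t, t ≤ 2 * program.length ∧ ∃ s, s < t ∧ pvTr program s = pvTr program t := by
  have hmaps : ∀ m ∈ Finset.range (2 * program.length + 1),
      pvTr program m ∈ Finset.Icc (-(program.length : Int)) ((program.length : Int) - 1) := by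
    intro m hm
    rw [Finset.mem_range] at hm
    have hb := pvTr_bounds hpre (k := m) (by omega)
    have hne := hno m (by omega)
    rw [Finset.mem_Icc]
    omega
  have hcard : (Finset.Icc (-(program.length : Int)) ((program.length : Int) - 1)).card
      < (Finset.range (2 * program.length + 1)).card := by
    rw [Int.card_Icc, Finset.card_range]
    omega
  obtain ⟨a, ha, b, hb, hab, heq⟩ :=
    Finset.exists_ne_map_eq_of_card_lt_of_maps_to hcard hmaps
  rw [Finset.mem_range] at ha hb
  rcases Nat.lt_or_ge a b with h | h
  · exact ⟨b, by omega, a, h, heq⟩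
  · exact ⟨a, by omega, b, by omega, heq.symm⟩

-- ===== VERDICT (by name: the statement is the Claim_ definition above) =====
theorem terminates_spec : Claim_equal_terminates := by
  intro program _ hpre
  unfold Spec_terminates terminates terminates_alt
  have hex : ∀ x : Int, x ∈ (PySem.Set.empty : PySem.Set Int) ↔ ∃ j, j < 0 ∧ pvTr program j = x := by
    intro x
    constructor
    · intro h; exact absurd h (List.not_mem_nil)
    · rintro ⟨j, hj, _⟩; omega
  by_cases h : ∃ m, m ≤ 2 * program.length ∧ pvTr program m = (program.length : Int)
  · -- the run terminates: both return the accumulator at the first hit of n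
    have h' : ∃ m, pvTr program m = (program.length : Int) := ⟨h.choose, h.choose_spec.2⟩
    set T := Nat.find h' with hTdef
    have hT : pvTr program T = (program.length : Int) := Nat.find_spec h'
    have hTle : T ≤ 2 * program.length := Nat.find_min' h' h.choose_spec.2 |>.trans h.choose_spec.1
    have hmin : ∀ j, j < T → pvTr program j ≠ (program.length : Int) := fun j hj => Nat.find_min h' hj
    have hdist : ∀ s t, s < t → t < T → pvTr program s ≠ pvTr program t := by
      intro s t hst htT heq
      have hper := pvTr_period heq (T - t)
      have hst' : s + (T - t) < T := by omega
      have : pvTr program (s + (T - t)) = (program.length : Int) := by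
        rw [hper]
        have : t + (T - t) = T := by omega
        rw [this, hT]
      exact hmin _ hst' this
    have hA := pvA_some hpre hTle hT hmin hdist (2 * program.length + 2) 0 PySem.Set.empty (by omega) (by omega) hex
    have hB := pvB_some hpre hTle hT hmin (2 * program.length + 1) 0 (by omega) (by omega)
    exact hA.trans hB.symm
  · -- the run loops: A detects the first repeated line, B exhausts its budget
    replace h : ∀ m, m ≤ 2 * program.length → pvTr program m ≠ (program.length : Int) :=
      fun m hm he => h ⟨m, hm, he⟩
    obtain ⟨t, htle, hrep⟩ := pvRepeat hpre h
    have hQ : ∃ t, ∃ s, s < t ∧ pvTr program s = pvTr program t := ⟨t, hrep⟩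
    set t0 := Nat.find hQ with ht0def
    have ht0 : ∃ s, s < t0 ∧ pvTr program s = pvTr program t0 := Nat.find_spec hQ
    have ht0le : t0 ≤ 2 * program.length := le_trans (Nat.find_min' hQ hrep) htle
    have hdist : ∀ s u, s < u → u < t0 → pvTr program s ≠ pvTr program u := by
      intro s u hsu hut0 heq
      exact Nat.find_min hQ hut0 ⟨s, hsu, heq⟩
    have hnoN : ∀ m, m ≤ t0 → pvTr program m ≠ (program.length : Int) := by
      intro m hm
      exact h m (by omega)
    have hA := pvA_none hpre ht0le ht0 hnoN hdist (2 * program.length + 2) 0 PySem.Set.empty (by omega) (by omega) hex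
    have hB := pvB_none hpre (2 * program.length + 1) 0 (by omega) (fun m hm => by
      rw [Nat.zero_add]
      exact h m (by omega))
    exact hA.trans hB.symm
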